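-- pv_equiv track=rewrite | github.com/kevinniechen/tinyalign | aligners/star.py | align_with_suffix_array
-- ===== SOURCE A (Python) =====
-- def binary_search_prefix(pattern, reference, suffix_array):
--     """Perform binary search on the suffix array to find the longest prefix match."""
--     left, right = 0, len(suffix_array) - 1
--     best_match_length = 0
--     best_match_position = -1
--
--     while left <= right:
--         mid = (left + right) // 2
--         suffix_start = suffix_array[mid]
--         suffix = reference[suffix_start:]
--
--         # Find the length of the matching prefix
--         match_length = 0
--         for a, b in zip(pattern, suffix):
--             if a != b:
--                 break
--             match_length += 1
--
--         # Update best match if necessary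
--         if match_length > best_match_length:
--             best_match_length = match_length
--             best_match_position = suffix_start
--
--         # Decide which half to search next
--         if pattern[: match_length + 1] <= suffix[: match_length + 1]:
--             right = mid - 1
--         else:
--             left = mid + 1
--
--     return best_match_position, best_match_length
--
-- def align_with_suffix_array(read, reference, suffix_array, min_seed_length=10):
--     """Align the read using binary search on the suffix array for longest prefix matches."""
--     results = []
--     start = 0
--     while start < len(read):
--         pos, length = binary_search_prefix(read[start:], reference, suffix_array)
--         if length >= min_seed_length:
--             results.append((pos, length, start))
--             start += length
--         else:
--             start += 1
--         if start + min_seed_length > len(read):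
--             break
--     return results
-- ===== SOURCE B (Python) =====
-- def align_with_suffix_array(read, reference, suffix_array, min_seed_length=10):
--     """Greedy seed alignment.  Each seed lookup is a recursive interval search
--     whose probe is one fused scan returning both the matched-prefix length and
--     the lexicographic order of the rest of the read against the probed suffix,
--     so no prefix copies of the read or of the suffix are ever materialised."""
--     n = len(read)
--
--     def probe(start, suffix):
--         # common-prefix length of read[start:] and suffix, plus whether
--         # read[start:] sorts before-or-equal to suffix
--         limit = min(n - start, len(suffix))
--         k = 0
--         while k < limit and read[start + k] == suffix[k]:
--             k += 1
--         if start + k == n: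
--             return k, True
--         if k == len(suffix):
--             return k, False
--         return k, read[start + k] < suffix[k]
--
--     def search(start, lo, hi, best):
--         if lo > hi:
--             return best
--         mid = (lo + hi) // 2
--         pos = suffix_array[mid]
--         k, goes_left = probe(start, reference[pos:])
--         if k > best[1]:
--             best = (pos, k)
--         if goes_left:
--             return search(start, lo, mid - 1, best)
--         return search(start, mid + 1, hi, best)
--
--     results = []
--     start = 0
--     while start < n:
--         pos, length = search(start, 0, len(suffix_array) - 1, (-1, 0))
--         if length >= min_seed_length:
--             results.append((pos, length, start))
--             start += length
--         else:
--             start += 1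
--         if start + min_seed_length > n:
--             break
--     return results
-- ===== Notes on version B (the rewrite author's own statement) =====
-- stated objective: alternative
-- what changed: B decomposes the seed lookup into a recursive interval search over (lo, hi) driven by a fused probe that returns the matched-prefix length together with the lexicographic order of the remaining read against the probed suffix in one scan, so B never materialises the read slice per outer step nor the pattern[:m+1]/suffix[:m+1] comparison copies A builds per probe; correctness of the fused order test rests on the fact that A's slice comparison at the first mismatch equals a single character comparison.
import Mathlib
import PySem

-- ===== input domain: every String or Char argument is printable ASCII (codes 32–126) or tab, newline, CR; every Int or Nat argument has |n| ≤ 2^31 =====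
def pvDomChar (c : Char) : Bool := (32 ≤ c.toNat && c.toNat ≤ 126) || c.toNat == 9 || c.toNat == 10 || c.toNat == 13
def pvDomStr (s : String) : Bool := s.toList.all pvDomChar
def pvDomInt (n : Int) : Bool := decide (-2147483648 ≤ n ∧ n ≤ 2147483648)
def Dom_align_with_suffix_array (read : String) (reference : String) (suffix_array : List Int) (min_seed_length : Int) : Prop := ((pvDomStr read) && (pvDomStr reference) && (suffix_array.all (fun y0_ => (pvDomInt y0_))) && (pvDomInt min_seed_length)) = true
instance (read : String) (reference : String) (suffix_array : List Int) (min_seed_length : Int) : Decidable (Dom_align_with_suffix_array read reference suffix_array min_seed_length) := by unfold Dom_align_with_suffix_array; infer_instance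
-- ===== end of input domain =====

-- B restructures the seed search: a recursive interval search whose probe is a
-- single fused scan giving the match length and the lexicographic order at once
-- (A materialises a read slice per outer step and three slices per probe); same
-- return value as A wherever A terminates (both loop forever on a non-positive
-- min_seed_length whenever a zero-length best seed is accepted).

-- ===== PORT A =====

-- A's inner `for a, b in zip(pattern, suffix): if a != b: break; match_length += 1`
def pvCplA : List Char → List Char → Int
  | a :: p, b :: s => if a ≠ b then (0 : Int) else pvCplA p s + 1
  | _, _ => 0

-- A's `while left <= right` binary search; fuel only makes the loop total
-- (the interval shrinks every iteration, so `sa.length + 1` never runs out).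
def pvBsearchA (pattern ref : List Char) (sa : List Int) : Nat → Int → Int → Int → Int → Int × Int
  | 0, _, _, bl, bp => (bp, bl)
  | fuel + 1, left, right, bl, bp =>
      if left ≤ right then
        let mid := PySem.Int.floordiv (left + right) 2
        let suffixStart := PySem.List.pyGetD sa mid 0   -- mid is always in range; default never read
        let suffix := PySem.List.slice ref (some suffixStart) none
        let m := pvCplA pattern suffix
        let bl' := if m > bl then m else bl
        let bp' := if m > bl then suffixStart else bp
        if PySem.List.slice pattern none (some (m + 1)) ≤ PySem.List.slice suffix none (some (m + 1)) then
          pvBsearchA pattern ref sa fuel left (mid - 1) bl' bp'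
        else
          pvBsearchA pattern ref sa fuel (mid + 1) right bl' bp'
      else (bp, bl)

-- A's `while start < len(read)` loop; fuel `len(read) + 1` makes it total
-- (whenever the Python loop terminates it advances each round, so ≤ len(read) rounds).
def pvAlignLoopA (rd rf : List Char) (sa : List Int) (msl : Int) : Nat → Int → List (Int × Int × Int) → List (Int × Int × Int)
  | 0, _, res => res
  | fuel + 1, start, res =>
      if start < (rd.length : Int) then
        let pr := pvBsearchA (PySem.List.slice rd (some start) none) rf sa (sa.length + 1) 0 ((sa.length : Int) - 1) 0 (-1)
        let res' := if pr.2 ≥ msl then res ++ [(pr.1, pr.2, start)] else res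
        let start' := if pr.2 ≥ msl then start + pr.2 else start + 1
        if start' + msl > (rd.length : Int) then res' else pvAlignLoopA rd rf sa msl fuel start' res'
      else res

def align_with_suffix_array (read : String) (reference : String) (suffix_array : List Int) (min_seed_length : Int) : List (Int × Int × Int) :=
  pvAlignLoopA read.toList reference.toList suffix_array min_seed_length (read.toList.length + 1) 0 []

-- ===== PORT B =====

-- B's fused probe loop `while k < limit and read[start + k] == suffix[k]`
def pvProbeLoopB (rd s : List Char) (start k : Nat) : Nat :=
  if h : k < min (rd.length - start) s.length ∧ rd.getD (start + k) default = s.getD k default then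
    pvProbeLoopB rd s start (k + 1)
  else k
termination_by min (rd.length - start) s.length - k

-- B's `probe`: match length plus the order of the rest of the read vs the suffix
def pvProbeDecide (rd : List Char) (start : Nat) (s : List Char) (k : Nat) : Nat × Bool :=
  if start + k = rd.length then (k, true)
  else if k = s.length then (k, false)
  else (k, decide (rd.getD (start + k) default < s.getD k default))

def pvProbeB (rd : List Char) (start : Nat) (s : List Char) : Nat × Bool :=
  pvProbeDecide rd start s (pvProbeLoopB rd s start 0)

-- B's recursive `search`; fuel only makes the recursion total
def pvSearchB (rd rf : List Char) (sa : List Int) (start : Nat) : Nat → Int → Int → Int × Int → Int × Int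
  | 0, _, _, best => best
  | fuel + 1, lo, hi, best =>
      if lo > hi then best
      else
        let mid := PySem.Int.floordiv (lo + hi) 2
        let pos := PySem.List.pyGetD sa mid 0   -- mid is always in range; default never read
        let pr := pvProbeB rd start (PySem.List.slice rf (some pos) none)
        let best' := if (pr.1 : Int) > best.2 then (pos, (pr.1 : Int)) else best
        if pr.2 then pvSearchB rd rf sa start fuel lo (mid - 1) best'
        else pvSearchB rd rf sa start fuel (mid + 1) hi best'

-- B's outer `while start < n` loop, fueled like A's
def pvAlignLoopB (rd rf : List Char) (sa : List Int) (msl : Int) : Nat → Nat → List (Int × Int × Int) → List (Int × Int × Int)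
  | 0, _, res => res
  | fuel + 1, start, res =>
      if start < rd.length then
        let pr := pvSearchB rd rf sa start (sa.length + 1) 0 ((sa.length : Int) - 1) (-1, 0)
        let res' := if pr.2 ≥ msl then res ++ [(pr.1, pr.2, (start : Int))] else res
        let start' := if pr.2 ≥ msl then start + pr.2.toNat else start + 1
        if (start' : Int) + msl > (rd.length : Int) then res' else pvAlignLoopB rd rf sa msl fuel start' res'
      else res

def align_with_suffix_array_alt (read : String) (reference : String) (suffix_array : List Int) (min_seed_length : Int) : List (Int × Int × Int) :=
  pvAlignLoopB read.toList reference.toList suffix_array min_seed_length (read.toList.length + 1) 0 []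

-- ===== PRECONDITION & SPEC =====
def Spec_align_with_suffix_array (read : String) (reference : String) (suffix_array : List Int) (min_seed_length : Int) (out : List (Int × Int × Int)) : Prop := out = align_with_suffix_array_alt read reference suffix_array min_seed_length
instance (read : String) (reference : String) (suffix_array : List Int) (min_seed_length : Int) (out : List (Int × Int × Int)) : Decidable (Spec_align_with_suffix_array read reference suffix_array min_seed_length out) := by unfold Spec_align_with_suffix_array; infer_instance

-- ===== CLAIM (what is proved, stated in full; the proofs are below) =====
def Claim_equal_align_with_suffix_array : Prop := ∀ (read : String) (reference : String) (suffix_array : List Int) (min_seed_length : Int), Dom_align_with_suffix_array read reference suffix_array min_seed_length → Spec_align_with_suffix_array read reference suffix_array min_seed_length (align_with_suffix_array read reference suffix_array min_seed_length)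

-- ===== LEMMAS AND PROOFS =====

-- Nat-valued common-prefix length, the reasoning currency between the two ports
def pvCplN : List Char → List Char → Nat
  | a :: p, b :: s => if a = b then pvCplN p s + 1 else 0
  | _, _ => 0

theorem pvCplA_eq (p s : List Char) : pvCplA p s = (pvCplN p s : Int) := by
  induction p generalizing s with
  | nil => cases s <;> simp [pvCplA, pvCplN]
  | cons a p ih =>
      cases s with
      | nil => simp [pvCplA, pvCplN]
      | cons b s =>
          by_cases h : a = b <;> simp [pvCplA, pvCplN, h, ih]

theorem pvCplN_le_left (p s : List Char) : pvCplN p s ≤ p.length := by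
  induction p generalizing s with
  | nil => cases s <;> simp [pvCplN]
  | cons a p ih =>
      cases s with
      | nil => simp [pvCplN]
      | cons b s =>
          by_cases h : a = b
          · simp [pvCplN, h]; exact ih s
          · simp [pvCplN, h]

theorem pvCplN_le_right (p s : List Char) : pvCplN p s ≤ s.length := by
  induction p generalizing s with
  | nil => cases s <;> simp [pvCplN]
  | cons a p ih =>
      cases s with
      | nil => simp [pvCplN]
      | cons b s =>
          by_cases h : a = b <;> simp [pvCplN, h]
          exact ih s

theorem pvGetD_drop (l : List Char) (i m : Nat) (d : Char) :
    (l.drop i).getD m d = l.getD (i + m) d := by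
  simp [List.getD, List.getElem?_drop]

-- B's probe loop computes the common-prefix length of read[start:] and s
theorem pvProbeLoopB_eq (rd s : List Char) (start : Nat) :
    ∀ k, pvProbeLoopB rd s start k = k + pvCplN (rd.drop (start + k)) (s.drop k) := by
  intro k
  fun_induction pvProbeLoopB rd s start k with
  | case1 k h ih =>
      obtain ⟨hk, heq⟩ := h
      have h1 : start + k < rd.length := by omega
      have h2 : k < s.length := by omega
      rw [List.drop_eq_getElem_cons h1, List.drop_eq_getElem_cons h2]
      have heq' : rd[start + k] = s[k] := by
        simpa [List.getD, List.getElem?_eq_getElem, h1, h2] using heq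
      have hcons : pvCplN (rd[start + k] :: rd.drop (start + k + 1)) (s[k] :: s.drop (k + 1))
          = pvCplN (rd.drop (start + k + 1)) (s.drop (k + 1)) + 1 := by simp [pvCplN, heq']
      rw [hcons, ih]
      have harg : start + (k + 1) = start + k + 1 := by omega
      rw [harg]
      omega
  | case2 k h =>
      rw [not_and_or] at h
      rcases h with hk | hne
      · rcases Nat.lt_or_ge (start + k) rd.length with h1 | h1
        · have h2 : s.length ≤ k := by omega
          rw [List.drop_eq_nil_of_le h2]
          cases rd.drop (start + k) <;> simp [pvCplN]
        · rw [List.drop_eq_nil_of_le h1]; simp [pvCplN]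
      · rcases Nat.lt_or_ge (start + k) rd.length with h1 | h1
        · rcases Nat.lt_or_ge k s.length with h2 | h2
          · rw [List.drop_eq_getElem_cons h1, List.drop_eq_getElem_cons h2]
            have : ¬ rd[start + k] = s[k] := by
              simpa [List.getD, List.getElem?_eq_getElem, h1, h2] using hne
            simp [pvCplN, this]
          · rw [List.drop_eq_nil_of_le h2]
            cases rd.drop (start + k) <;> simp [pvCplN]
        · rw [List.drop_eq_nil_of_le h1]; simp [pvCplN]

-- A's slice comparison at the mismatch point, characterised
theorem pvTake_le_iff (p s : List Char) :
    (p.take (pvCplN p s + 1) ≤ s.take (pvCplN p s + 1)) ↔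
      (pvCplN p s = p.length ∨
        (pvCplN p s < s.length ∧ p.getD (pvCplN p s) default < s.getD (pvCplN p s) default)) := by
  induction p generalizing s with
  | nil =>
      cases s with
      | nil => simp [pvCplN]
      | cons b s =>
          simp only [pvCplN, List.take_nil, List.length_nil]
          exact iff_of_true (not_lt.mp (List.not_lt_nil _)) (by simp)
  | cons a p ih =>
      cases s with
      | nil =>
          simp only [pvCplN, List.take_nil, List.take_succ_cons]
          constructor
          · intro h
            exact absurd (List.nil_lt_cons _ _) (not_lt.mpr h)
          · intro h; simp at h
      | cons b s =>
          by_cases h : a = b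
          · subst h
            have hc : pvCplN (a :: p) (a :: s) = pvCplN p s + 1 := by simp [pvCplN]
            rw [hc, List.take_succ_cons, List.take_succ_cons, ← not_lt,
              List.cons_lt_cons_iff]
            simp only [lt_irrefl, false_or, true_and, not_lt, ih s, List.getD_cons_succ,
              List.length_cons]
            exact or_congr (by omega) (and_congr (by omega) Iff.rfl)
          · have hc : pvCplN (a :: p) (b :: s) = 0 := by simp [pvCplN, h]
            rw [hc, List.take_succ_cons, List.take_succ_cons, List.take_zero, List.take_zero,
              ← not_lt, List.cons_lt_cons_iff]
            simp only [List.lt_irrefl, and_false, or_false, not_lt, List.length_cons,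
              List.getD_cons_zero]
            constructor
            · intro hba
              refine Or.inr ⟨by omega, ?_⟩
              rcases lt_or_eq_of_le hba with hlt | heq
              · exact hlt
              · exact absurd heq h
            · rintro (hlen | ⟨_, hab⟩)
              · omega
              · exact le_of_lt hab

-- B's probe agrees with A's per-probe computation
theorem pvProbeB_fst (rd : List Char) (start : Nat) (s : List Char) :
    (pvProbeB rd start s).1 = pvCplN (rd.drop start) s := by
  unfold pvProbeB pvProbeDecide
  have h0 := pvProbeLoopB_eq rd s start 0
  simp only [Nat.add_zero, List.drop_zero, Nat.zero_add] at h0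
  rw [h0]
  split_ifs <;> rfl

theorem pvProbeB_snd (rd : List Char) (start : Nat) (s : List Char) (hs : start ≤ rd.length) :
    (pvProbeB rd start s).2 = true ↔
      ((rd.drop start).take (pvCplN (rd.drop start) s + 1) ≤ s.take (pvCplN (rd.drop start) s + 1)) := by
  unfold pvProbeB pvProbeDecide
  have h0 := pvProbeLoopB_eq rd s start 0
  simp only [Nat.add_zero, List.drop_zero, Nat.zero_add] at h0
  set m := pvCplN (rd.drop start) s with hm
  rw [pvTake_le_iff, ← hm, h0]
  have hml : m ≤ rd.length - start := by
    have := pvCplN_le_left (rd.drop start) s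
    simpa [List.length_drop, ← hm] using this
  have hmr : m ≤ s.length := by
    have := pvCplN_le_right (rd.drop start) s
    simpa [← hm] using this
  have hplen : (rd.drop start).length = rd.length - start := by simp
  split_ifs with h1 h2
  · exact iff_of_true rfl (Or.inl (by rw [hplen]; omega))
  · refine iff_of_false (by simp) ?_
    rintro (hl | ⟨hlt, _⟩)
    · rw [hplen] at hl; omega
    · omega
  · simp only [decide_eq_true_eq]
    rw [pvGetD_drop]
    constructor
    · intro hlt
      right
      exact ⟨by omega, hlt⟩
    · rintro (hl | ⟨_, hlt⟩)
      · rw [hplen] at hl; omega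
      · exact hlt

-- the two binary searches agree
theorem pvBsearch_bridge (rd rf : List Char) (sa : List Int) (i : Nat) (hile : i ≤ rd.length) :
    ∀ (fuel : Nat) (l r bl bp : Int),
      pvBsearchA (rd.drop i) rf sa fuel l r bl bp = pvSearchB rd rf sa i fuel l r (bp, bl) := by
  intro fuel
  induction fuel with
  | zero => intro l r bl bp; rfl
  | succ fuel ih =>
      intro l r bl bp
      rw [pvBsearchA, pvSearchB]
      by_cases hlr : l ≤ r
      · rw [if_pos hlr, if_neg (not_lt.mpr hlr)]
        simp only
        set pos := PySem.List.pyGetD sa (PySem.Int.floordiv (l + r) 2) 0 with hpos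
        set s := PySem.List.slice rf (some pos) none with hs
        set m : Nat := pvCplN (rd.drop i) s with hmdef
        have hfst : (pvProbeB rd i s).1 = m := pvProbeB_fst rd i s
        rw [pvCplA_eq, ← hmdef]
        have hslice : PySem.List.slice (rd.drop i) none (some ((m : Int) + 1))
            = (rd.drop i).take (m + 1) := by
          have hcast : ((m : Int) + 1) = ((m + 1 : Nat) : Int) := by push_cast; ring
          rw [hcast, PySem.List.slice_to_natCast]
        have hslice2 : PySem.List.slice s none (some ((m : Int) + 1)) = s.take (m + 1) := by
          have hcast : ((m : Int) + 1) = ((m + 1 : Nat) : Int) := by push_cast; ring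
          rw [hcast, PySem.List.slice_to_natCast]
        have hcond : (PySem.List.slice (rd.drop i) none (some ((m : Int) + 1))
            ≤ PySem.List.slice s none (some ((m : Int) + 1))) ↔ (pvProbeB rd i s).2 = true := by
          rw [hslice, hslice2, pvProbeB_snd rd i s hile]
        have hbest : ((if (m : Int) > bl then pos else bp), (if (m : Int) > bl then (m : Int) else bl))
            = (if ((pvProbeB rd i s).1 : Int) > (bp, bl).2 then (pos, ((pvProbeB rd i s).1 : Int)) else (bp, bl)) := by
          rw [hfst]
          by_cases hm : (m : Int) > bl <;> simp [hm]
        by_cases hcb : (pvProbeB rd i s).2 = true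
        · rw [if_pos (hcond.mpr hcb), hcb, if_pos rfl, ih, hbest]
        · have hcb' : (pvProbeB rd i s).2 = false := by
            cases hb : (pvProbeB rd i s).2
            · rfl
            · exact absurd hb hcb
          rw [if_neg (fun hle => hcb (hcond.mp hle)), hcb']
          simp only [Bool.false_eq_true, if_false]
          rw [ih, hbest]
      · rw [if_neg hlr, if_pos (not_le.mp hlr)]

theorem pvSearchB_len_nonneg (rd rf : List Char) (sa : List Int) (i : Nat) :
    ∀ (fuel : Nat) (l r : Int) (best : Int × Int), 0 ≤ best.2 → 0 ≤ (pvSearchB rd rf sa i fuel l r best).2 := by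
  intro fuel
  induction fuel with
  | zero => intro l r best h; exact h
  | succ fuel ih =>
      intro l r best h
      simp only [pvSearchB]
      split_ifs <;>
        first
          | exact h
          | exact ih _ _ _ (by simp)
          | exact ih _ _ _ h

theorem pvAlign_bridge (rd rf : List Char) (sa : List Int) (msl : Int) :
    ∀ (fuel : Nat) (i : Nat) (res : List (Int × Int × Int)),
      pvAlignLoopA rd rf sa msl fuel (i : Int) res = pvAlignLoopB rd rf sa msl fuel i res := by
  intro fuel
  induction fuel with
  | zero => intro i res; rfl
  | succ fuel ih =>
      intro i res
      rw [pvAlignLoopA, pvAlignLoopB]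
      by_cases hlt : i < rd.length
      · rw [if_pos (by exact_mod_cast hlt), if_pos hlt]
        simp only
        have hslice : PySem.List.slice rd (some (i : Int)) none = rd.drop i :=
          PySem.List.slice_from_natCast rd i
        rw [hslice, pvBsearch_bridge rd rf sa i (le_of_lt hlt)]
        set pr := pvSearchB rd rf sa i (sa.length + 1) 0 ((sa.length : Int) - 1) (-1, 0) with hpr
        have hpr2 : 0 ≤ pr.2 := pvSearchB_len_nonneg rd rf sa i _ _ _ _ le_rfl
        have hc1 : ((i : Int) + pr.2) = ((i + pr.2.toNat : Nat) : Int) := by push_cast; omega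
        have hc2 : ((i : Int) + 1) = ((i + 1 : Nat) : Int) := by push_cast; ring
        by_cases hseed : pr.2 ≥ msl
        · simp only [if_pos hseed, hc1]
          split_ifs with hbreak
          · rfl
          · exact ih _ _
        · simp only [if_neg hseed, hc2]
          split_ifs with hbreak
          · rfl
          · exact ih _ _
      · rw [if_neg (by exact_mod_cast hlt), if_neg hlt]

-- ===== VERDICT (by name: the statement is the Claim_ definition above) =====
theorem align_with_suffix_array_spec : Claim_equal_align_with_suffix_array := by
  intro read reference sa msl _
  unfold Spec_align_with_suffix_array align_with_suffix_array align_with_suffix_array_alt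
  have := pvAlign_bridge read.toList reference.toList sa msl (read.toList.length + 1) 0 []
  simpa using this
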